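-- pv_equiv track=rewrite | github.com/chfw/alg4_robert_kevin_in_py | example_code_in_python/test_graph.py | _parse_fixtures
-- ===== SOURCE A (Python) =====
-- from textwrap import dedent
--
-- def _parse_fixtures(docstring):
--     lines = dedent(docstring).split('\n')
--
--     record_result = False
--     results = []
--     params = []
--     command = None
--     for line in lines:
--         if record_result:
--             if line == '' or line == '...':
--                 params.append((command, results))
--                 results = []
--                 command = None
--                 record_result = False
--             else:
--                 results.append(line)
--         elif line.startswith('%'):
--             command = line
--             record_result = True
--     return params
-- ===== SOURCE B (Python) =====
-- from textwrap import dedent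
--
-- def _parse_fixtures(docstring):
--     lines = dedent(docstring).split('\n')
--     n = len(lines)
--     params = []
--     i = 0
--     while i < n:
--         if lines[i].startswith('%'):
--             command = lines[i]
--             results = []
--             j = i + 1
--             while j < n and lines[j] != '' and lines[j] != '...':
--                 results.append(lines[j])
--                 j += 1
--             if j < n:
--                 params.append((command, results))
--             i = j + 1
--         else:
--             i += 1
--     return params
-- ===== Notes on version B (the rewrite author's own statement) =====
-- stated objective: alternative
-- what changed: Replaces the flag-based single-pass state machine (record_result/results/command mutated per line) with an index-driven nested scan: the outer loop finds '%' command lines, an inner loop collects result lines up to the '' / '...' terminator, and an unterminated trailing record is dropped because the inner loop runs off the end.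
import Mathlib
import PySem

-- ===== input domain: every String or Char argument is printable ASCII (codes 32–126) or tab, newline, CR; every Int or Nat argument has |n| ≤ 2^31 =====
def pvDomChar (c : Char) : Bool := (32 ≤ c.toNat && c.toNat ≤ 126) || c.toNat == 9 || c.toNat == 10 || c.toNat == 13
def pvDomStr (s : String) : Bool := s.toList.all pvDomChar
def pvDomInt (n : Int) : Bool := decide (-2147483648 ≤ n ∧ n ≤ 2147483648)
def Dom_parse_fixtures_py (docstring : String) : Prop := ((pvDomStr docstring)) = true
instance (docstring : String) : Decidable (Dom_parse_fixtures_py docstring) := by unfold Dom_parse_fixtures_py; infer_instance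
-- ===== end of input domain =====

-- B replaces A's flag-based state machine by an index-driven nested scan (outer scan to a
-- '%' line, inner scan to the '' / '...' terminator); same return value, alternative structure.

-- ===== shared helper: textwrap.dedent, followed by split('\n') =====
-- Both Pythons call the stdlib `dedent(docstring).split('\n')`; this helper ports that call
-- exactly (CPython textwrap.dedent): whitespace-only lines are normalized to '', the margin is
-- the longest common leading run of spaces/tabs over the remaining nonempty lines (CPython's
-- three margin branches all compute the longest common prefix, ported as `pvLcp`), and the
-- margin is stripped from every line that starts with it.  Since dedent never creates or
-- removes '\n', joining its lines and re-splitting on '\n' is the identity, so the helper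
-- returns the line list directly.
def pvWsOnly (l : List Char) : Bool := !l.isEmpty && l.all (fun c => c == ' ' || c == '\t')

def pvLcp : List Char → List Char → List Char
  | a :: as, b :: bs => if a = b then a :: pvLcp as bs else []
  | _, _ => []

def pyDedentLines (s : String) : List String :=
  let ls := ((PySem.Str.split? s "\n").getD []).map String.toList  -- "\n" ≠ "", so split? = some
  let ls1 := ls.map (fun l => if pvWsOnly l then [] else l)        -- _whitespace_only_re.sub('', …)
  let indents := (ls1.filter (fun l => !l.isEmpty)).map
      (fun l => l.takeWhile (fun c => c == ' ' || c == '\t'))      -- _leading_whitespace_re.findall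
  let margin := match indents with
    | [] => []
    | i :: is => is.foldl pvLcp i
  let ls2 := ls1.map (fun l => if margin.isPrefixOf l then l.drop margin.length else l)
  ls2.map String.ofList

-- ===== PORT A =====
-- the for-loop over `lines` with state (record_result, results, params, command)
def pvALoop (record_result : Bool) (results : List String)
    (params : List (String × List String)) (command : Option String) :
    List String → List (String × List String)
  | [] => params
  | line :: rest =>
    if record_result then
      if line = "" ∨ line = "..." then
        -- command is always `some` here; `.getD ""` only discharges the Option
        pvALoop false [] (params ++ [(command.getD "", results)]) none rest
      else
        pvALoop record_result (results ++ [line]) params command rest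
    else if PySem.Str.startswith line "%" then
      pvALoop true results params (some line) rest
    else
      pvALoop record_result results params command rest

def parse_fixtures_py (docstring : String) : List (String × List String) :=
  pvALoop false [] [] none (pyDedentLines docstring)

-- ===== PORT B =====
-- a non-terminator result line: neither '' nor '...'
def pvKeep (line : String) : Bool := line != "" && line != "..."

-- outer scan: find a '%' command line, inner scan (takeWhile/dropWhile = the j-loop) collects
-- results up to the terminator; if the inner scan ran off the end the record is dropped.
def pvBScan : List String → List (String × List String)
  | [] => []
  | line :: rest =>
    if PySem.Str.startswith line "%" then
      match h : rest.dropWhile pvKeep with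
      | [] => []   -- no terminator: drop the unterminated record and stop
      | _ :: rest' => (line, rest.takeWhile pvKeep) :: pvBScan rest'
    else pvBScan rest
termination_by ls => ls.length
decreasing_by
  · have h1 : (rest.dropWhile pvKeep).length ≤ rest.length := List.length_dropWhile_le pvKeep rest
    rw [h] at h1
    simp at h1 ⊢
    omega
  · simp

def parse_fixtures_py_alt (docstring : String) : List (String × List String) :=
  pvBScan (pyDedentLines docstring)

-- ===== PRECONDITION & SPEC =====
def Spec_parse_fixtures_py (docstring : String) (out : List (String × List String)) : Prop := out = parse_fixtures_py_alt docstring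
instance (docstring : String) (out : List (String × List String)) : Decidable (Spec_parse_fixtures_py docstring out) := by unfold Spec_parse_fixtures_py; infer_instance

-- ===== CLAIM (what is proved, stated in full; the proofs are below) =====
def Claim_equal_parse_fixtures_py : Prop := ∀ (docstring : String), Dom_parse_fixtures_py docstring → Spec_parse_fixtures_py docstring (parse_fixtures_py docstring)

-- ===== LEMMAS AND PROOFS =====

-- B's in-record continuation: what pvBScan contributes after command c with results so far
def pvBTail (c : String) (results : List String) (lines : List String) :
    List (String × List String) :=
  match lines.dropWhile pvKeep with
  | [] => []
  | _ :: rest => (c, results ++ lines.takeWhile pvKeep) :: pvBScan rest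

theorem pvKeep_false_iff (l : String) : pvKeep l = false ↔ (l = "" ∨ l = "...") := by
  simp [pvKeep]
  tauto

theorem pvBTail_nil (c : String) (results : List String) : pvBTail c results [] = [] := by
  simp [pvBTail]

theorem pvBTail_keep (c : String) (results : List String) (l : String) (rest : List String)
    (h : pvKeep l = true) :
    pvBTail c results (l :: rest) = pvBTail c (results ++ [l]) rest := by
  simp [pvBTail, h]

theorem pvBTail_term (c : String) (results : List String) (l : String) (rest : List String)
    (h : pvKeep l = false) :
    pvBTail c results (l :: rest) = (c, results) :: pvBScan rest := by
  simp [pvBTail, h]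

theorem pvBScan_cons_cmd (l : String) (rest : List String)
    (h : PySem.Str.startswith l "%" = true) :
    pvBScan (l :: rest) = pvBTail l [] rest := by
  rw [pvBScan, pvBTail, if_pos h]
  rcases hd : rest.dropWhile pvKeep with _ | ⟨a, r⟩ <;> simp [hd]

theorem pvBScan_cons_skip (l : String) (rest : List String)
    (h : ¬ PySem.Str.startswith l "%" = true) :
    pvBScan (l :: rest) = pvBScan rest := by
  rw [pvBScan, if_neg h]

-- the joint loop invariant: A's state machine tracked against B's two scanning modes
theorem pvJoint (lines : List String) :
    (∀ params, pvALoop false [] params none lines = params ++ pvBScan lines) ∧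
    (∀ results params c,
      pvALoop true results params (some c) lines = params ++ pvBTail c results lines) := by
  induction lines with
  | nil => simp [pvALoop, pvBScan, pvBTail_nil]
  | cons l rest ih =>
    constructor
    · intro params
      rw [pvALoop]
      by_cases h : PySem.Str.startswith l "%" = true
      · rw [pvBScan_cons_cmd l rest h]
        simp only [Bool.false_eq_true, if_false, if_pos h]
        exact ih.2 [] params l
      · rw [pvBScan_cons_skip l rest h]
        simp only [Bool.false_eq_true, if_false, if_neg h]
        exact ih.1 params
    · intro results params c
      rw [pvALoop]
      by_cases h : l = "" ∨ l = "..."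
      · rw [pvBTail_term c results l rest ((pvKeep_false_iff l).mpr h)]
        simp [h, ih.1]
      · have hk : pvKeep l = true := by
          cases hkk : pvKeep l
          · exact absurd ((pvKeep_false_iff l).mp hkk) h
          · rfl
        rw [pvBTail_keep c results l rest hk]
        simp [h, ih.2]

-- ===== VERDICT (by name: the statement is the Claim_ definition above) =====
theorem parse_fixtures_py_spec : Claim_equal_parse_fixtures_py := by
  intro docstring _
  unfold Spec_parse_fixtures_py parse_fixtures_py parse_fixtures_py_alt
  simpa using (pvJoint (pyDedentLines docstring)).1 []
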